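-- pv_equiv track=rewrite | github.com/1155141394/tsdb_fyp | src/query.py | find_rows
-- ===== SOURCE A (Python) =====
-- def find_rows(arr, index1, index2):
--     rows = []
--     for i, row in enumerate(arr):
--         if index1 != -1 and index2 != -1:
--             if row[index1] == 1 and row[index2] == 1:
--                 rows.append(i)
--         elif index1 == -1 and index2 != -1:
--             if row[index2] == 1:
--                 rows.append(i)
--         elif index1 != -1 and index2 == -1:
--             if row[index1] == 1:
--                 rows.append(i)
--     return rows
-- ===== SOURCE B (Python) =====
-- def find_rows(arr, index1, index2):
--     # staged filtering: filter by the first active column, then refine by the second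
--     if index1 == -1 and index2 == -1:
--         return []
--     if index1 == -1:
--         return [i for i, row in enumerate(arr) if row[index2] == 1]
--     cand = [i for i, row in enumerate(arr) if row[index1] == 1]
--     if index2 == -1:
--         return cand
--     return [i for i in cand if arr[i][index2] == 1]
-- ===== Notes on version B (the rewrite author's own statement) =====
-- stated objective: alternative
-- what changed: Replaces A's single loop with a per-row three-way sentinel branch by staged filtering: early-return per sentinel case, one pass producing candidate row indices for the first active column, then a second refinement pass over only those candidates indexing back into arr for the second column.
import Mathlib
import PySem

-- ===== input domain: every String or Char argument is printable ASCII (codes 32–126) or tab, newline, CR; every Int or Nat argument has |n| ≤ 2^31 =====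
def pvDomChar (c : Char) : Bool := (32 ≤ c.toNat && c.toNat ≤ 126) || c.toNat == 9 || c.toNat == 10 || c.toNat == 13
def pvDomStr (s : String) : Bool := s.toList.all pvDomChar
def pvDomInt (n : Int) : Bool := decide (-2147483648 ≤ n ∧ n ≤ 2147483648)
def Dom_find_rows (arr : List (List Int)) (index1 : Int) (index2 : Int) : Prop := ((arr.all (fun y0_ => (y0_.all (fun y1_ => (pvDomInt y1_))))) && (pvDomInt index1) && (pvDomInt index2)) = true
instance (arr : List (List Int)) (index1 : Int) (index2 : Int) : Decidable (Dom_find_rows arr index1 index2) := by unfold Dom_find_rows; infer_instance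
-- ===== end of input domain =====

-- B replaces A's per-row three-way sentinel branch by staged filtering: early returns per
-- sentinel case, a first pass collecting candidate indices for one column, then a second
-- refinement pass over only the candidates (alternative decomposition, same cost).

-- ===== PORT A =====
def find_rows (arr : List (List Int)) (index1 : Int) (index2 : Int) : List Int :=
  (PySem.List.enumerate arr).foldl (fun rows p =>
    if index1 ≠ -1 ∧ index2 ≠ -1 then
      if PySem.List.pyGetD p.2 index1 0 = 1 ∧ PySem.List.pyGetD p.2 index2 0 = 1 then rows ++ [p.1] else rows
    else if index1 = -1 ∧ index2 ≠ -1 then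
      if PySem.List.pyGetD p.2 index2 0 = 1 then rows ++ [p.1] else rows
    else if index1 ≠ -1 ∧ index2 = -1 then
      if PySem.List.pyGetD p.2 index1 0 = 1 then rows ++ [p.1] else rows
    else rows) []

-- ===== PORT B =====
def find_rows_alt (arr : List (List Int)) (index1 : Int) (index2 : Int) : List Int :=
  if index1 = -1 ∧ index2 = -1 then []
  else if index1 = -1 then
    ((PySem.List.enumerate arr).filter (fun p => decide (PySem.List.pyGetD p.2 index2 0 = 1))).map (·.1)
  else
    let cand := ((PySem.List.enumerate arr).filter (fun p => decide (PySem.List.pyGetD p.2 index1 0 = 1))).map (·.1)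
    if index2 = -1 then cand
    else cand.filter (fun i => decide (PySem.List.pyGetD (PySem.List.pyGetD arr i []) index2 0 = 1))

-- ===== PRECONDITION & SPEC =====
-- Pre_ excludes exactly the inputs where Python A raises IndexError: for each row, every column
-- index the short-circuiting 'and' actually evaluates must be in Python range (|c| within len).
def Pre_find_rows (arr : List (List Int)) (index1 : Int) (index2 : Int) : Prop :=
  ∀ row ∈ arr,
    (index1 ≠ -1 → index2 ≠ -1 →
      PySem.Raise.InRange row.length index1 ∧
        (PySem.List.pyGetD row index1 0 = 1 → PySem.Raise.InRange row.length index2)) ∧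
    (index1 = -1 → index2 ≠ -1 → PySem.Raise.InRange row.length index2) ∧
    (index1 ≠ -1 → index2 = -1 → PySem.Raise.InRange row.length index1)
instance (arr : List (List Int)) (index1 : Int) (index2 : Int) : Decidable (Pre_find_rows arr index1 index2) := by unfold Pre_find_rows; infer_instance

def pvWitness_find_rows : List (List Int) × Int × Int := ([[1, 1], [0, 1], [1, 0]], 0, 1)

def Spec_find_rows (arr : List (List Int)) (index1 : Int) (index2 : Int) (out : List Int) : Prop := out = find_rows_alt arr index1 index2
instance (arr : List (List Int)) (index1 : Int) (index2 : Int) (out : List Int) : Decidable (Spec_find_rows arr index1 index2 out) := by unfold Spec_find_rows; infer_instance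

-- ===== CLAIM =====
def Claim_equal_find_rows : Prop := ∀ (arr : List (List Int)) (index1 : Int) (index2 : Int), Dom_find_rows arr index1 index2 → Pre_find_rows arr index1 index2 → Spec_find_rows arr index1 index2 (find_rows arr index1 index2)

-- ===== LEMMAS AND PROOFS =====

-- A's loop, once the fixed sentinel branch is resolved, is an append-if fold.
lemma foldl_if_prop {α : Type} (p : Int × α → Prop) [DecidablePred p]
    (l : List (Int × α)) (acc : List Int) :
    l.foldl (fun rows x => if p x then rows ++ [x.1] else rows) acc
      = acc ++ (l.filter (fun x => decide (p x))).map (·.1) := by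
  have h := PySem.List.foldl_append_if (fun x => decide (p x)) (fun x : Int × α => x.1) l acc
  simpa [decide_eq_true_eq] using h

-- Every pair produced by enumerate satisfies arr[i] = row.
lemma enum_getD (arr : List (List Int)) :
    ∀ s p, p ∈ PySem.List.enumerate arr s → PySem.List.pyGetD arr (p.1 - s) [] = p.2 := by
  induction arr with
  | nil => intro s p h; simp [PySem.List.enumerate_nil] at h
  | cons x xs ih =>
    intro s p h
    rw [PySem.List.enumerate_cons] at h
    rcases List.mem_cons.mp h with h | h
    · subst h; simp [PySem.List.pyGetD]
    · have hrec := ih (s + 1) p h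
      have hge : s + 1 ≤ p.1 := by
        have hmfe := PySem.List.map_fst_enumerate xs (s + 1)
        have hp1 : p.1 ∈ (PySem.List.enumerate xs (s + 1)).map (·.1) :=
          List.mem_map.mpr ⟨p, h, rfl⟩
        rw [hmfe] at hp1
        rw [PySem.List.mem_pyRange_one] at hp1
        omega
      have hc1 : p.1 - s = (((p.1 - s).toNat : Nat) : Int) := by omega
      have hc2 : p.1 - (s + 1) = (((p.1 - (s + 1)).toNat : Nat) : Int) := by omega
      have hsucc : (p.1 - s).toNat = (p.1 - (s + 1)).toNat + 1 := by omega
      rw [hc2, PySem.List.pyGetD_natCast] at hrec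
      rw [hc1, PySem.List.pyGetD_natCast, hsucc]
      simpa [List.getD] using hrec

theorem find_rows_spec : Claim_equal_find_rows := by
  intro arr index1 index2 _ _
  unfold Spec_find_rows find_rows find_rows_alt
  by_cases h1 : index1 = -1 <;> by_cases h2 : index2 = -1
  · simp [h1, h2]
  · -- index1 = -1, index2 ≠ -1 : single pass on index2
    rw [show (fun (rows : List Int) (p : Int × List Int) =>
          if index1 ≠ -1 ∧ index2 ≠ -1 then
            if PySem.List.pyGetD p.2 index1 0 = 1 ∧ PySem.List.pyGetD p.2 index2 0 = 1 then rows ++ [p.1] else rows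
          else if index1 = -1 ∧ index2 ≠ -1 then
            if PySem.List.pyGetD p.2 index2 0 = 1 then rows ++ [p.1] else rows
          else if index1 ≠ -1 ∧ index2 = -1 then
            if PySem.List.pyGetD p.2 index1 0 = 1 then rows ++ [p.1] else rows
          else rows)
        = fun rows p => if PySem.List.pyGetD p.2 index2 0 = 1 then rows ++ [p.1] else rows
        from by funext rows p; simp [h1, h2],
        foldl_if_prop (fun p : Int × List Int => PySem.List.pyGetD p.2 index2 0 = 1)]
    simp [h1, h2]
  · -- index1 ≠ -1, index2 = -1 : single pass on index1
    rw [show (fun (rows : List Int) (p : Int × List Int) =>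
          if index1 ≠ -1 ∧ index2 ≠ -1 then
            if PySem.List.pyGetD p.2 index1 0 = 1 ∧ PySem.List.pyGetD p.2 index2 0 = 1 then rows ++ [p.1] else rows
          else if index1 = -1 ∧ index2 ≠ -1 then
            if PySem.List.pyGetD p.2 index2 0 = 1 then rows ++ [p.1] else rows
          else if index1 ≠ -1 ∧ index2 = -1 then
            if PySem.List.pyGetD p.2 index1 0 = 1 then rows ++ [p.1] else rows
          else rows)
        = fun rows p => if PySem.List.pyGetD p.2 index1 0 = 1 then rows ++ [p.1] else rows
        from by funext rows p; simp [h1, h2],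
        foldl_if_prop (fun p : Int × List Int => PySem.List.pyGetD p.2 index1 0 = 1)]
    simp [h1, h2]
  · -- both ≠ -1 : A's conjunction pass = B's staged candidate pass + refinement
    rw [show (fun (rows : List Int) (p : Int × List Int) =>
          if index1 ≠ -1 ∧ index2 ≠ -1 then
            if PySem.List.pyGetD p.2 index1 0 = 1 ∧ PySem.List.pyGetD p.2 index2 0 = 1 then rows ++ [p.1] else rows
          else if index1 = -1 ∧ index2 ≠ -1 then
            if PySem.List.pyGetD p.2 index2 0 = 1 then rows ++ [p.1] else rows
          else if index1 ≠ -1 ∧ index2 = -1 then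
            if PySem.List.pyGetD p.2 index1 0 = 1 then rows ++ [p.1] else rows
          else rows)
        = fun rows p => if PySem.List.pyGetD p.2 index1 0 = 1 ∧ PySem.List.pyGetD p.2 index2 0 = 1 then rows ++ [p.1] else rows
        from by funext rows p; simp [h1, h2],
        foldl_if_prop (fun p : Int × List Int => PySem.List.pyGetD p.2 index1 0 = 1 ∧ PySem.List.pyGetD p.2 index2 0 = 1)]
    simp only [h1, h2, if_neg, and_false, List.nil_append, not_false_iff]
    simp only [List.filter_map, Function.comp_def]
    rw [List.filter_filter]
    congr 1
    apply List.filter_congr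
    intro p hp
    have hget := enum_getD arr 0 p hp
    simp only [sub_zero] at hget
    rw [hget, Bool.decide_and]
    exact Bool.and_comm _ _
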